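-- pv_equiv track=rewrite | github.com/sephirot94/random_algos | euler/leet/google.py | coffee_machine
-- ===== SOURCE A (Python) =====
-- def coffee_machine(buttons: list[int], cup: (int, int)) -> bool:
--     """
--     Given a coffee machine with n buttons that pour a specified amount of coffee and a cup that can hold a bounded
--     range of coffee, write a function that returns True if you can successfully fill the cup of coffee within the
--     given range using the buttons of the coffee machine. For example, a coffee machine that can pour 4, 7,
--     and 13 ounces cannot fill a cup that can hold 9 to 10 ounces of coffee.
--     That same coffee machine can fill a cup that can hold 9 to 11 ounces of coffee.
--     """
--     memo = {}
--     cup_min, cup_max = cup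
--
--     def helper(target):
--         if target < cup_min or target > cup_max:
--             return False
--
--         if target == 0:
--             return True
--
--         if target in memo:
--             return memo[target]
--
--         for button in buttons:
--             if helper(target - button):
--                 memo[target] = True
--                 return True
--
--         memo[target] = False
--         return False
--
--     return helper(cup_max)
-- ===== SOURCE B (Python) =====
-- def coffee_machine(buttons: list[int], cup: (int, int)) -> bool:
--     """Iterative forward reachability with an explicit stack and a visited set
--     instead of A's memoized recursion."""
--     cup_min, cup_max = cup
--     if cup_max < cup_min:
--         return False
--     seen = {cup_max}
--     stack = [cup_max]
--     while stack:
--         t = stack.pop()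
--         if t == 0:
--             return True
--         for b in buttons:
--             u = t - b
--             if cup_min <= u <= cup_max and u not in seen:
--                 seen.add(u)
--                 stack.append(u)
--     return False
-- ===== Notes on version B (the rewrite author's own statement) =====
-- stated objective: alternative
-- what changed: Replaced A's top-down memoized recursive helper with an iterative forward reachability search: an explicit stack plus a visited set over targets in [cup_min, cup_max], returning True as soon as 0 is popped.
-- outside the precondition, e.g. on coffee_machine([5, 0], (0, 5)): A returns True, B returns True; on coffee_machine([2, -4], (1, 3)): A returns False, B returns False
import Mathlib
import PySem

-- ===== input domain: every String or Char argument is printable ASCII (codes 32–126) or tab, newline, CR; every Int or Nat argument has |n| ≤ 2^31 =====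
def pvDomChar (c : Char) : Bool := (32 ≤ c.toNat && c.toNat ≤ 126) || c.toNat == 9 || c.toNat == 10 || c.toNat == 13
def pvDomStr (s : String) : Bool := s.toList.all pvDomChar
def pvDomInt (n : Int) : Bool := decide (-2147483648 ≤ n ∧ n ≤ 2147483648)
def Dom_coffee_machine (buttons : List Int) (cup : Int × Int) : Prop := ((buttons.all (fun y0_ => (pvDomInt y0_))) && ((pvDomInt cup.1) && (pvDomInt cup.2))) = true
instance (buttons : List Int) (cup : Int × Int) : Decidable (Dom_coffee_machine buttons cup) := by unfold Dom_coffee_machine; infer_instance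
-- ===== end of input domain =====

-- B replaces A's memoized recursion by an iterative explicit-stack reachability search
-- with a visited set (objective: alternative; same asymptotic cost).

-- ===== PORT A =====
-- Literal port of A's inner `helper` (memoized recursion) and its `for button in buttons`
-- loop; the memo dict is threaded through.  helper's three entry checks (range, zero, memo)
-- are inlined at its two call sites (the top-level call and the loop body) so that the
-- loop continuations are tail calls; the checks, their order, the values computed and the
-- memo writes are exactly A's.  The Nat fuel is only a totality guard: it is consumed once
-- per genuine recursive descent, and on Pre_ the descent depth is below the supplied fuel,
-- so the 0-fuel branch is never hit.
def pvLoopA (buttons : List Int) (lo hi : Int) : Nat → Int → List Int → PySem.Dict Int Bool → Bool × PySem.Dict Int Bool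
  | _, t, [], memo => (false, PySem.Dict.insert memo t false)
  | fuel, t, b :: bs, memo =>
    if t - b < lo ∨ hi < t - b then pvLoopA buttons lo hi fuel t bs memo
    else if t - b = 0 then (true, PySem.Dict.insert memo t true)
    else
      match PySem.Dict.get? memo (t - b) with
      | some v =>
        if v then (true, PySem.Dict.insert memo t true)
        else pvLoopA buttons lo hi fuel t bs memo
      | none =>
        match fuel with
        | 0 => pvLoopA buttons lo hi 0 t bs memo
        | f + 1 =>
          let p := pvLoopA buttons lo hi f (t - b) buttons memo
          if p.1 then (true, PySem.Dict.insert p.2 t true)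
          else pvLoopA buttons lo hi (f + 1) t bs p.2
  termination_by fuel _ bs _ => (fuel, bs.length)

def coffee_machine (buttons : List Int) (cup : Int × Int) : Bool :=
  if cup.2 < cup.1 ∨ cup.2 < cup.2 then false
  else if cup.2 = 0 then true
  else
    match PySem.Dict.get? (PySem.Dict.empty : PySem.Dict Int Bool) cup.2 with
    | some v => v
    | none => (pvLoopA buttons cup.1 cup.2 ((cup.2 - cup.1).toNat + 1) cup.2 buttons PySem.Dict.empty).1

-- ===== PORT B =====
-- Port of Source B: the body of the `for b in buttons` loop of the worklist search.
def pvStepB (lo hi t : Int) (p : PySem.Set Int × List Int) (b : Int) : PySem.Set Int × List Int :=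
  let u := t - b
  if lo ≤ u ∧ u ≤ hi ∧ PySem.Set.contains p.1 u = false then (PySem.Set.add p.1 u, u :: p.2) else p

-- The `while stack:` loop (stack top at the list head = Python's list end); the fuel is
-- only a totality guard — the visited set grows each time something is pushed, so on any
-- run the loop makes at most (hi-lo).toNat + 2 iterations before the stack empties.
def pvLoopB (buttons : List Int) (lo hi : Int) : Nat → PySem.Set Int → List Int → Bool
  | 0, _, _ => false
  | fuel + 1, seen, stack =>
    match stack with
    | [] => false
    | t :: rest =>
      if t = 0 then true
      else pvLoopB buttons lo hi fuel (buttons.foldl (pvStepB lo hi t) (seen, rest)).1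
             (buttons.foldl (pvStepB lo hi t) (seen, rest)).2

def coffee_machine_alt (buttons : List Int) (cup : Int × Int) : Bool :=
  if cup.2 < cup.1 then false
  else pvLoopB buttons cup.1 cup.2 ((cup.2 - cup.1).toNat + 3) (PySem.Set.ofList [cup.2]) [cup.2]

-- ===== PRECONDITION & SPEC =====
-- Pre_ excludes only inputs whose nonempty range comes with a zero/negative button outside
-- the trivially-terminating shapes below: there A's unguarded memoized recursion can revisit
-- an in-progress target and cycle (RecursionError), so whether A returns on such an input
-- is an accident of button order; A raises on part of this region and returns on the rest.
def Pre_coffee_machine (buttons : List Int) (cup : Int × Int) : Prop :=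
  cup.2 < cup.1 ∨ (cup.1 ≤ 0 ∧ cup.2 = 0) ∨ (∀ b ∈ buttons, 1 ≤ b) ∨
    (cup.2 ≠ 0 ∧ ∀ b ∈ buttons, b < 0 ∨ cup.2 - cup.1 < b)
instance (buttons : List Int) (cup : Int × Int) : Decidable (Pre_coffee_machine buttons cup) := by
  unfold Pre_coffee_machine; infer_instance

def pvWitness_coffee_machine : List Int × (Int × Int) := ([4, 7, 13], (9, 11))

def Spec_coffee_machine (buttons : List Int) (cup : Int × Int) (out : Bool) : Prop := out = coffee_machine_alt buttons cup
instance (buttons : List Int) (cup : Int × Int) (out : Bool) : Decidable (Spec_coffee_machine buttons cup out) := by unfold Spec_coffee_machine; infer_instance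

-- ===== CLAIM (what is proved, stated in full; the proofs are below) =====
def Claim_equal_coffee_machine : Prop := ∀ (buttons : List Int) (cup : Int × Int), Dom_coffee_machine buttons cup → Pre_coffee_machine buttons cup → Spec_coffee_machine buttons cup (coffee_machine buttons cup)

-- ===== LEMMAS AND PROOFS =====

-- Reference predicate: can `t` be driven to 0 by repeatedly subtracting buttons while
-- staying inside [lo, hi]?  (fuel-indexed; stable once the fuel exceeds (t-lo).toNat.)
def pvReachF (buttons : List Int) (lo hi : Int) : Nat → Int → Bool
  | 0, _ => false
  | fuel + 1, t =>
    if t < lo ∨ hi < t then false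
    else if t = 0 then true
    else buttons.any (fun b => pvReachF buttons lo hi fuel (t - b))

def pvReach (buttons : List Int) (lo hi t : Int) : Bool :=
  pvReachF buttons lo hi ((t - lo).toNat + 1) t

lemma pvReachF_out (buttons : List Int) (lo hi : Int) (fuel : Nat) (t : Int)
    (h : t < lo ∨ hi < t) : pvReachF buttons lo hi fuel t = false := by
  cases fuel with
  | zero => rw [pvReachF]
  | succ f => rw [pvReachF]; simp [h]

lemma pvReach_out (buttons : List Int) (lo hi t : Int) (h : t < lo ∨ hi < t) :
    pvReach buttons lo hi t = false := pvReachF_out _ _ _ _ _ h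

lemma pvReach_zero (buttons : List Int) (lo hi : Int) (h1 : lo ≤ 0) (h2 : (0:Int) ≤ hi) :
    pvReach buttons lo hi 0 = true := by
  rw [pvReach, pvReachF]
  simp [not_lt.mpr h1, not_lt.mpr h2]

lemma pvAnyCongrMem {α : Type} (l : List α) (f g : α → Bool)
    (h : ∀ a ∈ l, f a = g a) : l.any f = l.any g := by
  induction l with
  | nil => rfl
  | cons a l ih =>
    simp only [List.any_cons]
    rw [h a (by simp), ih (fun x hx => h x (by simp [hx]))]

lemma pvReachF_stab (buttons : List Int) (lo hi : Int) (Hpos : ∀ b ∈ buttons, 1 ≤ b) :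
    ∀ (f1 f2 : Nat) (t : Int), (t - lo).toNat < f1 → (t - lo).toNat < f2 →
      pvReachF buttons lo hi f1 t = pvReachF buttons lo hi f2 t := by
  intro f1
  induction f1 with
  | zero => intro f2 t h1 _; omega
  | succ g ih =>
    intro f2 t h1 h2
    cases f2 with
    | zero => omega
    | succ h =>
      rw [pvReachF, pvReachF]
      by_cases hout : t < lo ∨ hi < t
      · simp [hout]
      · by_cases h0 : t = 0
        · simp [h0]
        · simp only [if_neg hout, if_neg h0]
          apply pvAnyCongrMem
          intro b hb
          by_cases hc : t - b < lo ∨ hi < t - b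
          · rw [pvReachF_out _ _ _ _ _ hc, pvReachF_out _ _ _ _ _ hc]
          · have hb1 : 1 ≤ b := Hpos b hb
            rw [not_or, not_lt, not_lt] at hout hc
            rw [ih h (t - b) (by omega) (by omega)]

lemma pvReach_step (buttons : List Int) (lo hi : Int) (Hpos : ∀ b ∈ buttons, 1 ≤ b)
    (t : Int) (h1 : lo ≤ t) (h2 : t ≤ hi) (h0 : t ≠ 0) :
    pvReach buttons lo hi t = buttons.any (fun b => pvReach buttons lo hi (t - b)) := by
  rw [pvReach, pvReachF]
  simp only [if_neg (by omega : ¬ (t < lo ∨ hi < t)), if_neg h0]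
  apply pvAnyCongrMem
  intro b hb
  by_cases hc : t - b < lo ∨ hi < t - b
  · rw [pvReachF_out _ _ _ _ _ hc, pvReach_out _ _ _ _ hc]
  · have hb1 : 1 ≤ b := Hpos b hb
    rw [not_or, not_lt, not_lt] at hc
    exact pvReachF_stab buttons lo hi Hpos _ _ (t - b) (by omega) (by omega)

-- ===== A-side correctness: the memo always stores pvReach values =====
def pvInvA (buttons : List Int) (lo hi : Int) (memo : PySem.Dict Int Bool) : Prop :=
  ∀ k v, PySem.Dict.get? memo k = some v → v = pvReach buttons lo hi k

lemma pvInvA_empty (buttons : List Int) (lo hi : Int) : pvInvA buttons lo hi PySem.Dict.empty := by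
  intro k v h
  rw [PySem.Dict.get?_empty] at h
  exact absurd h (by simp)

lemma pvInvA_insert (buttons : List Int) (lo hi : Int) (memo : PySem.Dict Int Bool)
    (hinv : pvInvA buttons lo hi memo) (t : Int) (v : Bool) (hv : v = pvReach buttons lo hi t) :
    pvInvA buttons lo hi (PySem.Dict.insert memo t v) := by
  intro k w hw
  rw [PySem.Dict.get?_insert] at hw
  by_cases hk : k = t
  · rw [if_pos hk] at hw
    cases hw
    rw [hk]
    exact hv
  · rw [if_neg hk] at hw
    exact hinv k w hw

lemma pvLoopA_correct (buttons : List Int) (lo hi : Int) (Hpos : ∀ b ∈ buttons, 1 ≤ b) :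
    ∀ (fuel : Nat) (bs : List Int) (t : Int) (memo : PySem.Dict Int Bool),
      (∀ b ∈ bs, b ∈ buttons) → lo ≤ t → t ≤ hi → t ≠ 0 → (t - lo).toNat < fuel →
      pvInvA buttons lo hi memo →
      pvReach buttons lo hi t = bs.any (fun b => pvReach buttons lo hi (t - b)) →
      (pvLoopA buttons lo hi fuel t bs memo).1 = pvReach buttons lo hi t ∧
        pvInvA buttons lo hi (pvLoopA buttons lo hi fuel t bs memo).2 := by
  intro fuel
  induction fuel with
  | zero => intro bs t memo _ _ _ _ hf _ _; omega
  | succ F ihF =>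
    intro bs
    induction bs with
    | nil =>
      intro t memo _ h1 h2 h0 hF hinv hacc
      rw [pvLoopA]
      simp only [List.any_nil] at hacc
      exact ⟨hacc.symm, pvInvA_insert _ _ _ _ hinv _ _ hacc.symm⟩
    | cons b bs ihbs =>
      intro t memo hb h1 h2 h0 hF hinv hacc
      rw [pvLoopA]
      simp only [List.any_cons] at hacc
      by_cases hc : t - b < lo ∨ hi < t - b
      · rw [if_pos hc]
        rw [pvReach_out buttons lo hi (t - b) hc, Bool.false_or] at hacc
        exact ihbs t memo (fun x hx => hb x (by simp [hx])) h1 h2 h0 hF hinv hacc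
      · rw [if_neg hc]
        rw [not_or, not_lt, not_lt] at hc
        by_cases hz : t - b = 0
        · rw [if_pos hz]
          have hr : pvReach buttons lo hi (t - b) = true := by
            rw [hz]; exact pvReach_zero buttons lo hi (hz ▸ hc.1) (hz ▸ hc.2)
          have ht : pvReach buttons lo hi t = true := by rw [hacc, hr]; simp
          exact ⟨ht.symm, pvInvA_insert _ _ _ _ hinv _ _ ht.symm⟩
        · rw [if_neg hz]
          cases hm : PySem.Dict.get? memo (t - b) with
          | some v =>
            simp only []
            have hv : v = pvReach buttons lo hi (t - b) := hinv (t - b) v hm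
            by_cases hvt : v = true
            · rw [if_pos hvt]
              have ht : pvReach buttons lo hi t = true := by
                rw [hacc, ← hv, hvt]; simp
              exact ⟨ht.symm, pvInvA_insert _ _ _ _ hinv _ _ ht.symm⟩
            · rw [if_neg hvt]
              rw [Bool.not_eq_true] at hvt
              rw [← hv, hvt, Bool.false_or] at hacc
              exact ihbs t memo (fun x hx => hb x (by simp [hx])) h1 h2 h0 hF hinv hacc
          | none =>
            simp only []
            have hb1 : 1 ≤ b := Hpos b (hb b (by simp))
            have hchild := ihF buttons (t - b) memo (fun _ h => h) hc.1 hc.2 hz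
              (by omega) hinv
              (pvReach_step buttons lo hi Hpos (t - b) hc.1 hc.2 hz)
            obtain ⟨hc1, hc2⟩ := hchild
            by_cases hp : (pvLoopA buttons lo hi F (t - b) buttons memo).1 = true
            · simp only [hp, if_true]
              have ht : pvReach buttons lo hi t = true := by
                rw [hacc, ← hc1, hp]; simp
              exact ⟨ht.symm, pvInvA_insert _ _ _ _ hc2 _ _ ht.symm⟩
            · simp only [Bool.not_eq_true] at hp
              simp only [hp, Bool.false_eq_true, if_false]
              rw [← hc1, hp, Bool.false_or] at hacc
              exact ihbs t _ (fun x hx => hb x (by simp [hx])) h1 h2 h0 hF hc2 hacc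

-- ===== B-side correctness =====
-- forward reachability from hi (every node of a derivation lies in [lo, hi])
inductive pvFrom (buttons : List Int) (lo hi : Int) : Int → Prop
  | base : lo ≤ hi → pvFrom buttons lo hi hi
  | step (t b : Int) : pvFrom buttons lo hi t → b ∈ buttons → lo ≤ t - b → t - b ≤ hi →
      pvFrom buttons lo hi (t - b)

lemma pvFrom_range (buttons : List Int) (lo hi t : Int) (h : pvFrom buttons lo hi t) :
    lo ≤ t ∧ t ≤ hi := by
  induction h with
  | base h => exact ⟨h, le_refl hi⟩
  | step t b _ _ h1 h2 _ => exact ⟨h1, h2⟩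

lemma pvFrom_reach (buttons : List Int) (lo hi : Int) (Hpos : ∀ b ∈ buttons, 1 ≤ b)
    (t : Int) (h : pvFrom buttons lo hi t) (hr : pvReach buttons lo hi t = true) :
    pvReach buttons lo hi hi = true := by
  induction h with
  | base _ => exact hr
  | step t b ht hb h1 h2 iht =>
    apply iht
    obtain ⟨g1, g2⟩ := pvFrom_range buttons lo hi t ht
    by_cases h0 : t = 0
    · subst h0; exact pvReach_zero buttons lo hi g1 g2
    · rw [pvReach_step buttons lo hi Hpos t g1 g2 h0]
      rw [List.any_eq_true]
      exact ⟨b, hb, hr⟩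

lemma pvClosed_false (buttons : List Int) (lo hi : Int) (Hpos : ∀ b ∈ buttons, 1 ≤ b)
    (S : List Int) (hS : ∀ t ∈ S, lo ≤ t ∧ t ≤ hi) (h0 : (0:Int) ∉ S)
    (hcl : ∀ t ∈ S, ∀ b ∈ buttons, lo ≤ t - b → t - b ≤ hi → t - b ∈ S) :
    ∀ t ∈ S, pvReach buttons lo hi t = false := by
  have main : ∀ (n : Nat), ∀ t ∈ S, (t - lo).toNat ≤ n → pvReach buttons lo hi t = false := by
    intro n
    induction n with
    | zero =>
      intro t ht hn
      obtain ⟨g1, g2⟩ := hS t ht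
      have h0' : t ≠ 0 := fun h => h0 (h ▸ ht)
      rw [pvReach_step buttons lo hi Hpos t g1 g2 h0']
      rw [List.any_eq_false]
      intro b hb
      have hb1 : 1 ≤ b := Hpos b hb
      simp [pvReach_out buttons lo hi (t - b) (by omega)]
    | succ n ihn =>
      intro t ht hn
      obtain ⟨g1, g2⟩ := hS t ht
      have h0' : t ≠ 0 := fun h => h0 (h ▸ ht)
      rw [pvReach_step buttons lo hi Hpos t g1 g2 h0']
      rw [List.any_eq_false]
      intro b hb
      have hb1 : 1 ≤ b := Hpos b hb
      by_cases hc : t - b < lo ∨ hi < t - b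
      · simp [pvReach_out buttons lo hi (t - b) hc]
      · rw [not_or, not_lt, not_lt] at hc
        simp [ihn (t - b) (hcl t ht b hb hc.1 hc.2) (by omega)]
  intro t ht
  exact main (t - lo).toNat t ht (le_refl _)

def pvInvB (buttons : List Int) (lo hi : Int) (seen stack : List Int) : Prop :=
  seen.Nodup ∧ hi ∈ seen ∧ (∀ t ∈ seen, pvFrom buttons lo hi t) ∧ (∀ t ∈ stack, t ∈ seen) ∧
    (∀ t ∈ seen, t ∉ stack → t ≠ 0 ∧ ∀ b ∈ buttons, lo ≤ t - b → t - b ≤ hi → t - b ∈ seen)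

-- Everything the invariant needs about one full pass of the inner for-loop.
lemma pvFoldB (buttons : List Int) (lo hi t : Int) (ht : pvFrom buttons lo hi t) :
    ∀ (l : List Int), (∀ b ∈ l, b ∈ buttons) → ∀ (seen rest : List Int), seen.Nodup →
      (∀ x ∈ seen, pvFrom buttons lo hi x) → (∀ x ∈ rest, x ∈ seen) →
      (l.foldl (pvStepB lo hi t) (seen, rest)).1.Nodup ∧
      (∀ x ∈ (l.foldl (pvStepB lo hi t) (seen, rest)).1, pvFrom buttons lo hi x) ∧
      (∀ x ∈ seen, x ∈ (l.foldl (pvStepB lo hi t) (seen, rest)).1) ∧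
      (∀ x ∈ rest, x ∈ (l.foldl (pvStepB lo hi t) (seen, rest)).2) ∧
      (∀ x ∈ (l.foldl (pvStepB lo hi t) (seen, rest)).2, x ∈ (l.foldl (pvStepB lo hi t) (seen, rest)).1) ∧
      (∀ b ∈ l, lo ≤ t - b → t - b ≤ hi → t - b ∈ (l.foldl (pvStepB lo hi t) (seen, rest)).1) ∧
      (∀ x ∈ (l.foldl (pvStepB lo hi t) (seen, rest)).1, x ∉ (l.foldl (pvStepB lo hi t) (seen, rest)).2 → x ∈ seen) ∧
      (l.foldl (pvStepB lo hi t) (seen, rest)).2.length + seen.length =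
        (l.foldl (pvStepB lo hi t) (seen, rest)).1.length + rest.length := by
  intro l
  induction l with
  | nil =>
    intro _ seen rest hnd hfrom hrs
    simp only [List.foldl_nil]
    exact ⟨hnd, hfrom, fun x hx => hx, fun x hx => hx, hrs, by simp,
      fun x hx _ => hx, by omega⟩
  | cons b l ih =>
    intro hl seen rest hnd hfrom hrs
    rw [List.foldl_cons]
    by_cases hcond : lo ≤ t - b ∧ t - b ≤ hi ∧ PySem.Set.contains seen (t - b) = false
    · have hstep : pvStepB lo hi t (seen, rest) b =
          (PySem.Set.add seen (t - b), (t - b) :: rest) := by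
        rw [pvStepB]
        simp only [if_pos hcond]
      rw [hstep]
      have hbB : b ∈ buttons := hl b (by simp)
      have hfromu : pvFrom buttons lo hi (t - b) :=
        pvFrom.step t b ht hbB hcond.1 hcond.2.1
      have hnd' : (PySem.Set.add seen (t - b)).Nodup := PySem.Set.nodup_add seen (t - b) hnd
      have hfrom' : ∀ x ∈ PySem.Set.add seen (t - b), pvFrom buttons lo hi x := by
        intro x hx
        rcases (PySem.Set.mem_add seen (t - b) x).mp hx with hx' | hx'
        · exact hfrom x hx'
        · exact hx' ▸ hfromu
      have hrs' : ∀ x ∈ (t - b) :: rest, x ∈ PySem.Set.add seen (t - b) := by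
        intro x hx
        rcases List.mem_cons.mp hx with hx' | hx'
        · exact (PySem.Set.mem_add seen (t - b) x).mpr (Or.inr hx')
        · exact (PySem.Set.mem_add seen (t - b) x).mpr (Or.inl (hrs x hx'))
      obtain ⟨a1, a2, a3, a4, a5, a6, a7, a8⟩ :=
        ih (fun x hx => hl x (by simp [hx])) (PySem.Set.add seen (t - b)) ((t - b) :: rest)
          hnd' hfrom' hrs'
      have hlenadd : (PySem.Set.add seen (t - b)).length = seen.length + 1 := by
        rw [PySem.Set.add, hcond.2.2]
        simp
      refine ⟨a1, a2, ?_, ?_, a5, ?_, ?_, ?_⟩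
      · intro x hx
        exact a3 x ((PySem.Set.mem_add seen (t - b) x).mpr (Or.inl hx))
      · intro x hx
        exact a4 x (by simp [hx])
      · intro b' hb' hlo hhi
        rcases List.mem_cons.mp hb' with rfl | hmem
        · exact a3 _ ((PySem.Set.mem_add seen (t - b') _).mpr (Or.inr rfl))
        · exact a6 b' hmem hlo hhi
      · intro x hx hnx
        have hmem := a7 x hx hnx
        rcases (PySem.Set.mem_add seen (t - b) x).mp hmem with h | h
        · exact h
        · exact absurd (h ▸ a4 (t - b) (by simp)) hnx
      · rw [hlenadd] at a8
        simp only [List.length_cons] at a8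
        omega
    · have hstep : pvStepB lo hi t (seen, rest) b = (seen, rest) := by
        rw [pvStepB]
        simp only [if_neg hcond]
      rw [hstep]
      obtain ⟨a1, a2, a3, a4, a5, a6, a7, a8⟩ :=
        ih (fun x hx => hl x (by simp [hx])) seen rest hnd hfrom hrs
      refine ⟨a1, a2, a3, a4, a5, ?_, a7, a8⟩
      intro b' hb' hlo hhi
      rcases List.mem_cons.mp hb' with rfl | hmem
      · have hcont : PySem.Set.contains seen (t - b') = true := by
          by_contra hcf
          exact hcond ⟨hlo, hhi, by simpa using hcf⟩
        have hmemseen : t - b' ∈ seen := by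
          simpa [PySem.Set.contains] using hcont
        exact a3 _ hmemseen
      · exact a6 b' hmem hlo hhi

lemma pvNodupRangeLen (lo hi : Int) (l : List Int) (hnd : l.Nodup)
    (hb : ∀ x ∈ l, lo ≤ x ∧ x ≤ hi) : l.length ≤ (hi - lo).toNat + 1 := by
  have hsub : l.toFinset ⊆ Finset.Icc lo hi := by
    intro x hx
    rw [Finset.mem_Icc]
    exact hb x (by simpa using hx)
  have h1 : l.toFinset.card = l.length := List.toFinset_card_of_nodup hnd
  have h2 : l.toFinset.card ≤ (Finset.Icc lo hi).card := Finset.card_le_card hsub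
  rw [Int.card_Icc] at h2
  omega

lemma pvLoopB_correct (buttons : List Int) (lo hi : Int) (Hpos : ∀ b ∈ buttons, 1 ≤ b) :
    ∀ (fuel : Nat) (seen stack : List Int), pvInvB buttons lo hi seen stack →
      fuel + seen.length ≥ ((hi - lo).toNat + 1) + stack.length + 1 →
      pvLoopB buttons lo hi fuel seen stack = pvReach buttons lo hi hi := by
  intro fuel
  induction fuel with
  | zero =>
    intro seen stack hinv hfuel
    obtain ⟨hnd, hhi, hfrom, hsub, hproc⟩ := hinv
    have hlen : seen.length ≤ (hi - lo).toNat + 1 :=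
      pvNodupRangeLen lo hi seen hnd (fun x hx => pvFrom_range buttons lo hi x (hfrom x hx))
    omega
  | succ F ihF =>
    intro seen stack hinv hfuel
    obtain ⟨hnd, hhi, hfrom, hsub, hproc⟩ := hinv
    rw [pvLoopB.eq_def]
    cases stack with
    | nil =>
      have hcl0 : (0:Int) ∉ seen := fun h => (hproc 0 h (by simp)).1 rfl
      have hclosed : ∀ x ∈ seen, ∀ b ∈ buttons, lo ≤ x - b → x - b ≤ hi → x - b ∈ seen :=
        fun x hx => (hproc x hx (by simp)).2
      have hfalse := pvClosed_false buttons lo hi Hpos seen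
        (fun x hx => pvFrom_range buttons lo hi x (hfrom x hx)) hcl0 hclosed hi hhi
      exact hfalse.symm
    | cons t rest =>
      by_cases h0 : t = 0
      · simp only [if_pos h0]
        have hft : pvFrom buttons lo hi t := hfrom t (hsub t (by simp))
        obtain ⟨g1, g2⟩ := pvFrom_range buttons lo hi t hft
        have hr0 : pvReach buttons lo hi t = true := by
          subst h0
          exact pvReach_zero buttons lo hi g1 g2
        exact (pvFrom_reach buttons lo hi Hpos t hft hr0).symm
      · simp only [if_neg h0]
        have hft : pvFrom buttons lo hi t := hfrom t (hsub t (by simp))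
        obtain ⟨a1, a2, a3, a4, a5, a6, a7, a8⟩ :=
          pvFoldB buttons lo hi t hft buttons (fun _ h => h) seen rest hnd hfrom
            (fun x hx => hsub x (by simp [hx]))
        apply ihF
        · refine ⟨a1, a3 hi hhi, a2, a5, ?_⟩
          intro x hx hnx
          have hxseen : x ∈ seen := a7 x hx hnx
          by_cases hxt : x = t
          · subst hxt
            exact ⟨h0, fun b hb hlo hhi' => a6 b hb hlo hhi'⟩
          · have hnottop : x ∉ t :: rest := by
              intro hmem
              rcases List.mem_cons.mp hmem with h | h
              · exact hxt h
              · exact hnx (a4 x h)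
            obtain ⟨hx0, hxcl⟩ := hproc x hxseen hnottop
            exact ⟨hx0, fun b hb hlo hhi' => a3 _ (hxcl b hb hlo hhi')⟩
        · simp only [List.length_cons] at hfuel
          omega

-- ===== dead-end helpers for the Pre_ shapes that do not need positivity =====
lemma pvLoopA_dead (buttons : List Int) (lo hi : Int) (f : Nat) :
    ∀ (bs : List Int) (memo : PySem.Dict Int Bool), (∀ b ∈ bs, b < 0 ∨ hi - lo < b) →
      pvLoopA buttons lo hi f hi bs memo = (false, PySem.Dict.insert memo hi false) := by
  intro bs
  induction bs with
  | nil =>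
    intro memo _
    cases f with
    | zero => rw [pvLoopA]
    | succ g => rw [pvLoopA]
  | cons b bs ih =>
    intro memo hb
    have hc : hi - b < lo ∨ hi < hi - b := by
      rcases hb b (by simp) with h | h
      · right; omega
      · left; omega
    cases f with
    | zero =>
      rw [pvLoopA, if_pos hc]
      exact ih memo (fun x hx => hb x (by simp [hx]))
    | succ g =>
      rw [pvLoopA, if_pos hc]
      exact ih memo (fun x hx => hb x (by simp [hx]))

lemma pvFoldB_dead (lo hi t : Int) :
    ∀ (l : List Int) (seen : PySem.Set Int) (rest : List Int),
      (∀ b ∈ l, t - b < lo ∨ hi < t - b) →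
      l.foldl (pvStepB lo hi t) (seen, rest) = (seen, rest) := by
  intro l
  induction l with
  | nil => intro seen rest _; rfl
  | cons b l ih =>
    intro seen rest hb
    rw [List.foldl_cons]
    have : pvStepB lo hi t (seen, rest) b = (seen, rest) := by
      rw [pvStepB]
      have := hb b (by simp)
      simp only []
      rw [if_neg (by omega)]
    rw [this]
    exact ih seen rest (fun x hx => hb x (by simp [hx]))

-- ===== assembling the four Pre_ shapes =====
theorem coffee_machine_spec : Claim_equal_coffee_machine := by
  intro buttons cup _ hpre
  obtain ⟨lo, hi⟩ := cup
  unfold Pre_coffee_machine at hpre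
  unfold Spec_coffee_machine coffee_machine coffee_machine_alt
  simp only [] at hpre ⊢
  rcases hpre with h1 | h2 | h3 | h4
  · -- empty range
    rw [if_pos (Or.inl h1), if_pos h1]
  · -- cup = (lo, 0) with lo ≤ 0: both return True at once
    obtain ⟨hlo0, hhi0⟩ := h2
    subst hhi0
    rw [if_neg (by omega : ¬ ((0:Int) < lo ∨ (0:Int) < 0)), if_pos rfl,
      if_neg (not_lt.mpr hlo0)]
    have e2 : ((0:Int) - lo).toNat + 3 = (((0:Int) - lo).toNat + 2) + 1 := rfl
    rw [e2, pvLoopB.eq_def]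
    simp
  · -- all buttons positive: both equal the reachability predicate
    by_cases hlt : hi < lo
    · rw [if_pos (Or.inl hlt), if_pos hlt]
    · rw [if_neg (by omega : ¬ (hi < lo ∨ hi < hi)), if_neg hlt]
      have hlohi : lo ≤ hi := not_lt.mp hlt
      have hB : pvLoopB buttons lo hi ((hi - lo).toNat + 3) (PySem.Set.ofList [hi]) [hi] =
          pvReach buttons lo hi hi := by
        have hofl : PySem.Set.ofList [hi] = [hi] := rfl
        rw [hofl]
        have hinv : pvInvB buttons lo hi [hi] [hi] := by
          refine ⟨by simp, by simp, ?_, fun x hx => hx, ?_⟩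
          · intro x hx
            rcases List.mem_singleton.mp hx with rfl
            exact pvFrom.base hlohi
          · intro x hx hnx
            exact absurd hx hnx
        exact pvLoopB_correct buttons lo hi h3 ((hi - lo).toNat + 3) [hi] [hi] hinv (by simp)
      rw [hB]
      by_cases h0 : hi = 0
      · rw [if_pos h0]
        subst h0
        exact (pvReach_zero buttons lo 0 hlohi le_rfl).symm
      · rw [if_neg h0, PySem.Dict.get?_empty]
        exact (pvLoopA_correct buttons lo hi h3 ((hi - lo).toNat + 1) buttons hi
          PySem.Dict.empty (fun _ h => h) hlohi le_rfl h0 (by omega)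
          (pvInvA_empty buttons lo hi)
          (pvReach_step buttons lo hi h3 hi hlohi le_rfl h0)).1
  · -- every button overshoots in one step: both sides fail after one round
    obtain ⟨hhi0, hdead⟩ := h4
    by_cases hlt : hi < lo
    · rw [if_pos (Or.inl hlt), if_pos hlt]
    · rw [if_neg (by omega : ¬ (hi < lo ∨ hi < hi)), if_neg hhi0,
        PySem.Dict.get?_empty, if_neg hlt]
      rw [pvLoopA_dead buttons lo hi _ buttons PySem.Dict.empty hdead]
      have e2 : (hi - lo).toNat + 3 = ((hi - lo).toNat + 2) + 1 := rfl
      rw [e2, pvLoopB.eq_def]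
      simp only [if_neg hhi0]
      have hfd : buttons.foldl (pvStepB lo hi hi) (PySem.Set.ofList [hi], ([] : List Int)) =
          (PySem.Set.ofList [hi], ([] : List Int)) := by
        apply pvFoldB_dead
        intro b hb
        rcases hdead b hb with h | h
        · right; omega
        · left; omega
      rw [hfd]
      have e3 : (hi - lo).toNat + 2 = ((hi - lo).toNat + 1) + 1 := rfl
      rw [e3, pvLoopB.eq_def]
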